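-- pv_equiv track=rewrite | github.com/sergiu484/DroneAidedHealthcareServices | ParteaSP.py | Scoatere
-- ===== SOURCE A (Python) =====
-- import copy
--
-- def Scoatere(centreDrone, Ri, Centru):
--     c2 = copy.deepcopy(centreDrone)
--     c2.remove(Centru)
--     R2 = copy.deepcopy(Ri)
--     for i in range(0, len(R2)):  # scoate centru de la fiecare pacient din centru
--         try:
--             R2[i].remove(Centru)
--         except ValueError:
--             pass
--         if len(R2[i]) == 0:  # daca centru a fost scos si pacientul este in afara atunci nu se modifica,
--             return centreDrone, Ri, False
--     return c2, R2, True
-- ===== SOURCE B (Python) =====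
-- def Scoatere(centreDrone, Ri, Centru):
--     # find-index + slicing removal of the center (same ValueError as A's remove when absent)
--     i = centreDrone.index(Centru)
--     c2 = centreDrone[:i] + centreDrone[i+1:]
--     # predicate-first: decide failure directly from the input, no copies built
--     for p in Ri:
--         if len(p) == 0 or (len(p) == 1 and p[0] == Centru):
--             return centreDrone, Ri, False
--     # success: strip first occurrence of Centru from each row by index slicing
--     R2 = [p[:p.index(Centru)] + p[p.index(Centru)+1:] if Centru in p else list(p) for p in Ri]
--     return c2, R2, True
-- ===== Notes on version B (the rewrite author's own statement) =====
-- stated objective: alternative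
-- what changed: B decides the failure case by a predicate over the input rows (empty row or row == [Centru]) before building anything, then produces the stripped rows in one comprehension via index+slicing, instead of A's deep-copy-then-mutate-and-measure loop with try/except; the failure case builds no copy of Ri.
import Mathlib
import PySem

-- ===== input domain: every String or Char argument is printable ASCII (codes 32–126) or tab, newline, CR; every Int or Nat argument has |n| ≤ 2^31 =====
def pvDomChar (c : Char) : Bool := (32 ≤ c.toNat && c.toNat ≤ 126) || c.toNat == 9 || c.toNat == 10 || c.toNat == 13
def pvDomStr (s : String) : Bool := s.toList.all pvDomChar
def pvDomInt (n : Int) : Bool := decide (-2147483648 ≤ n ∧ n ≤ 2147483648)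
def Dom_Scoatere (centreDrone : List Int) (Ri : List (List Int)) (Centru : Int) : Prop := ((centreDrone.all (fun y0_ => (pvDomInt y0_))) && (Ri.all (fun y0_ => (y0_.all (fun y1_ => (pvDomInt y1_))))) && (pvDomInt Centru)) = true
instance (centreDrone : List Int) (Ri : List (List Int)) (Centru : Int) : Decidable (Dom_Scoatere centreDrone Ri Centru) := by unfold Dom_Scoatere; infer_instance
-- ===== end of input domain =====

-- B decides the failure case by a predicate over the input rows before building anything,
-- then strips the center from each row by index+slicing in one comprehension (objective: alternative decomposition).

-- ===== PORT A =====
-- A's for-loop with its early `return centreDrone, Ri, False`: none = early return.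
def pvRowsA (Centru : Int) : List (List Int) → Option (List (List Int))
  | [] => some []
  | r :: rs =>
      let r' := (PySem.List.remove? r Centru).getD r   -- try: remove / except ValueError: pass
      if r'.length = 0 then none
      else (pvRowsA Centru rs).map (r' :: ·)

def Scoatere (centreDrone : List Int) (Ri : List (List Int)) (Centru : Int) : List Int × List (List Int) × Bool :=
  match PySem.List.remove? centreDrone Centru with
  | none => (centreDrone, Ri, false)   -- c2.remove raises ValueError; excluded by Pre_
  | some c2 =>
    match pvRowsA Centru Ri with
    | none => (centreDrone, Ri, false)
    | some R2 => (c2, R2, true)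

-- ===== PORT B =====
-- p[:i] + p[i+1:] with i = p.index(Centru), guarded by `Centru in p`
def pvStripRow (Centru : Int) (p : List Int) : List Int :=
  if Centru ∈ p then
    match PySem.List.index? p Centru with
    | some i => PySem.List.slice p none (some (i : Int)) ++ PySem.List.slice p (some ((i : Int) + 1)) none
    | none => p
  else p

def pvBadRow (Centru : Int) (p : List Int) : Bool :=
  p.length == 0 || (p.length == 1 && PySem.List.pyGet? p 0 == some Centru)

def Scoatere_alt (centreDrone : List Int) (Ri : List (List Int)) (Centru : Int) : List Int × List (List Int) × Bool :=
  match PySem.List.index? centreDrone Centru with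
  | none => (centreDrone, Ri, false)   -- centreDrone.index raises ValueError; excluded by Pre_
  | some i =>
    let c2 := PySem.List.slice centreDrone none (some (i : Int)) ++ PySem.List.slice centreDrone (some ((i : Int) + 1)) none
    if Ri.any (pvBadRow Centru) then (centreDrone, Ri, false)
    else (c2, Ri.map (pvStripRow Centru), true)

-- ===== PRECONDITION & SPEC =====
-- A raises ValueError when Centru is not in centreDrone (c2.remove); exactly those inputs are excluded.
def Pre_Scoatere (centreDrone : List Int) (Ri : List (List Int)) (Centru : Int) : Prop :=
  Centru ∈ centreDrone
instance (centreDrone : List Int) (Ri : List (List Int)) (Centru : Int) : Decidable (Pre_Scoatere centreDrone Ri Centru) := by unfold Pre_Scoatere; infer_instance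

def pvWitness_Scoatere : List Int × List (List Int) × Int := ([1, 2], [[1], [2, 1]], 2)

def Spec_Scoatere (centreDrone : List Int) (Ri : List (List Int)) (Centru : Int) (out : List Int × List (List Int) × Bool) : Prop := out = Scoatere_alt centreDrone Ri Centru
instance (centreDrone : List Int) (Ri : List (List Int)) (Centru : Int) (out : List Int × List (List Int) × Bool) : Decidable (Spec_Scoatere centreDrone Ri Centru out) := by unfold Spec_Scoatere; infer_instance

-- ===== CLAIM (what is proved, stated in full; the proofs are below) =====
def Claim_equal_Scoatere : Prop := ∀ (centreDrone : List Int) (Ri : List (List Int)) (Centru : Int), Dom_Scoatere centreDrone Ri Centru → Pre_Scoatere centreDrone Ri Centru → Spec_Scoatere centreDrone Ri Centru (Scoatere centreDrone Ri Centru)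

-- ===== LEMMAS AND PROOFS =====

-- index + two slices = erase (for the element's first occurrence)
theorem pv_slice_erase {xs : List Int} {v : Int} {i : ℕ}
    (h : PySem.List.index? xs v = some i) :
    PySem.List.slice xs none (some (i : Int)) ++ PySem.List.slice xs (some ((i : Int) + 1)) none
      = xs.erase v := by
  rw [PySem.List.index?_eq_some_iff] at h
  obtain ⟨pre, suf, rfl, rfl, hnm⟩ := h
  rw [PySem.List.slice_to_natCast]
  have : ((pre.length : Int) + 1) = ((pre.length + 1 : ℕ) : Int) := by push_cast; ring
  rw [this, PySem.List.slice_from_natCast]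
  rw [List.erase_append_right _ (by simpa using hnm)]
  simp [List.drop_append]

theorem pv_strip_eq (Centru : Int) (p : List Int) :
    pvStripRow Centru p = (PySem.List.remove? p Centru).getD p := by
  unfold pvStripRow
  by_cases hm : Centru ∈ p
  · rcases hi : PySem.List.index? p Centru with _ | i
    · rw [PySem.List.index?_eq_none_iff] at hi; exact absurd hm hi
    · rw [if_pos hm, PySem.List.remove?_eq_some_erase _ _ hm]; dsimp only; exact pv_slice_erase hi
  · rw [if_neg hm, (PySem.List.remove?_eq_none_iff ..).mpr hm]; rfl

theorem pv_bad_iff (Centru : Int) (p : List Int) :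
    pvBadRow Centru p = true ↔ ((PySem.List.remove? p Centru).getD p).length = 0 := by
  match p with
  | [] => simp [pvBadRow, PySem.List.remove?]
  | [x] =>
      by_cases hx : x = Centru
      · subst hx; simp [pvBadRow, PySem.List.pyGet?, PySem.List.pyIdx?]
      · rw [PySem.List.remove?_cons_of_ne _ hx]
        simp [pvBadRow, PySem.List.pyGet?, PySem.List.pyIdx?, PySem.List.remove?, hx]
  | x :: y :: t =>
      constructor
      · intro h; simp [pvBadRow] at h
      · intro h; exfalso
        by_cases hmem : Centru ∈ x :: y :: t
        · rw [PySem.List.remove?_eq_some_erase _ _ hmem] at h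
          have := List.length_erase_of_mem hmem
          simp at h this
        · simp [(PySem.List.remove?_eq_none_iff ..).mpr hmem] at h

theorem pv_rows_none_iff (Centru : Int) (Ri : List (List Int)) :
    pvRowsA Centru Ri = none ↔ Ri.any (pvBadRow Centru) = true := by
  induction Ri with
  | nil => simp [pvRowsA]
  | cons r rs ih =>
      unfold pvRowsA
      by_cases h : ((PySem.List.remove? r Centru).getD r).length = 0
      · simp [h, List.any_cons, (pv_bad_iff Centru r).mpr h]
      · have hb : pvBadRow Centru r = false := by
          rcases hb : pvBadRow Centru r with _ | _
          · rfl
          · exact absurd ((pv_bad_iff Centru r).mp hb) h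
        simp only [h, if_false, List.any_cons, hb, Bool.false_or, ← ih]
        rcases pvRowsA Centru rs with _ | R2 <;> simp

theorem pv_rows_some (Centru : Int) (Ri R2 : List (List Int))
    (h : pvRowsA Centru Ri = some R2) : R2 = Ri.map (pvStripRow Centru) := by
  induction Ri generalizing R2 with
  | nil => simp [pvRowsA] at h; subst h; rfl
  | cons r rs ih =>
      unfold pvRowsA at h
      by_cases h0 : ((PySem.List.remove? r Centru).getD r).length = 0
      · simp [h0] at h
      · simp only [h0, if_false] at h
        rcases hr : pvRowsA Centru rs with _ | rest
        · rw [hr] at h; simp at h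
        · rw [hr] at h; simp at h
          simp [← h, ih rest hr, pv_strip_eq]

-- ===== VERDICT (by name: the statement is the Claim_ definition above) =====
theorem Scoatere_spec : Claim_equal_Scoatere := by
  intro centreDrone Ri Centru _hdom hpre
  unfold Pre_Scoatere at hpre
  unfold Spec_Scoatere Scoatere Scoatere_alt
  rcases hi : PySem.List.index? centreDrone Centru with _ | i
  · rw [PySem.List.index?_eq_none_iff] at hi; exact absurd hpre hi
  · rw [PySem.List.remove?_eq_some_erase _ _ hpre]
    dsimp only
    rcases hrows : pvRowsA Centru Ri with _ | R2
    · rw [if_pos ((pv_rows_none_iff Centru Ri).mp hrows)]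
    · have hany : Ri.any (pvBadRow Centru) = false := by
        rcases h : Ri.any (pvBadRow Centru) with _ | _
        · rfl
        · rw [← pv_rows_none_iff] at h; rw [h] at hrows; cases hrows
      rw [hany]
      simp only [Bool.false_eq_true, if_false, Prod.mk.injEq]
      exact ⟨(pv_slice_erase hi).symm, pv_rows_some Centru Ri R2 hrows, trivial⟩
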